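-- pv_equiv track=rewrite | github.com/iLeadGroup/iLead | code/pattern_matcher.py | rank_matched_pattern
-- ===== SOURCE A (Python) =====
-- def rank_matched_pattern(match, rank_list):
--     ranked_match_triples = []
--     for tag in match:
--         for pattern in match[tag]:
--             if pattern not in rank_list:
--                 continue
--             ranked_match_triples.append((pattern, tag, rank_list.index(pattern)))
--     ranked_match_triples.sort(key=lambda x: x[2])
--     return ranked_match_triples
-- ===== SOURCE B (Python) =====
-- def rank_matched_pattern(match, rank_list):
--     # Build the result already in rank order by driving the traversal from
--     # rank_list instead of collecting then sorting.
--     ranked_match_triples = []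
--     seen = set()
--     for i, pat in enumerate(rank_list):
--         if pat in seen:
--             continue
--         seen.add(pat)
--         for tag in match:
--             for p in match[tag]:
--                 if p == pat:
--                     ranked_match_triples.append((pat, tag, i))
--     return ranked_match_triples
-- ===== Notes on version B (the rewrite author's own statement) =====
-- stated objective: alternative
-- what changed: B builds the result already in rank order by iterating enumerate(rank_list) (deduplicating repeated patterns with a seen set) and scanning the match dict for each first-occurrence pattern, eliminating A's collect-then-sort pass.
import Mathlib
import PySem

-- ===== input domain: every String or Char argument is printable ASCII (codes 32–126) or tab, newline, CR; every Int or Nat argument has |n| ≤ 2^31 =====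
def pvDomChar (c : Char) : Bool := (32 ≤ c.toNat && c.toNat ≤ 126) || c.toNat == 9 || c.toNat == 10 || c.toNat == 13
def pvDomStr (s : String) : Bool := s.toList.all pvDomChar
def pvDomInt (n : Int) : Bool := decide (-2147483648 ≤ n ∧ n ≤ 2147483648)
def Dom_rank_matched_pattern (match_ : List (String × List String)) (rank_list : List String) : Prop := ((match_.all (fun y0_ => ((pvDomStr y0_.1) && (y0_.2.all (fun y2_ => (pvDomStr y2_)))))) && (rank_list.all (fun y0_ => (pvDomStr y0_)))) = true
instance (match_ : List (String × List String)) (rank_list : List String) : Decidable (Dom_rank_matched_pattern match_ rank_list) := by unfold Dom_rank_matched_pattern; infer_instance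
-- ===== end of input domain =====

-- B replaces A's collect-then-sort with a single traversal driven by rank_list
-- (seen-set dedup + per-pattern scan of the dict), producing the output already
-- in rank order; same return value, similar cost (objective: alternative).

-- ===== PORT A =====
def rank_matched_pattern (match_ : List (String × List String)) (rank_list : List String) : List (String × String × Int) :=
  let d := PySem.Dict.ofList match_
  let ranked_match_triples := d.items.foldl (fun acc tv =>
    tv.2.foldl (fun acc pattern =>
      if rank_list.contains pattern then
        acc ++ [(pattern, tv.1, (((PySem.List.index? rank_list pattern).getD 0 : Nat) : Int))]
      else acc) acc) []
  PySem.List.sorted ranked_match_triples (fun x => x.2.2) false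

-- ===== PORT B =====
def rank_matched_pattern_alt (match_ : List (String × List String)) (rank_list : List String) : List (String × String × Int) :=
  let d := PySem.Dict.ofList match_
  let st := (PySem.List.enumerate rank_list 0).foldl
    (fun (st : PySem.Set String × List (String × String × Int)) ip =>
      if PySem.Set.contains st.1 ip.2 then st
      else (PySem.Set.add st.1 ip.2,
        d.items.foldl (fun out tv =>
          tv.2.foldl (fun out p =>
            if p == ip.2 then out ++ [(ip.2, tv.1, ip.1)] else out) out) st.2))
    (PySem.Set.empty, [])
  st.2

-- ===== PRECONDITION & SPEC =====
def Spec_rank_matched_pattern (match_ : List (String × List String)) (rank_list : List String) (out : List (String × String × Int)) : Prop := out = rank_matched_pattern_alt match_ rank_list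
instance (match_ : List (String × List String)) (rank_list : List String) (out : List (String × String × Int)) : Decidable (Spec_rank_matched_pattern match_ rank_list out) := by unfold Spec_rank_matched_pattern; infer_instance

-- ===== CLAIM (what is proved, stated in full; the proofs are below) =====
def Claim_equal_rank_matched_pattern : Prop := ∀ (match_ : List (String × List String)) (rank_list : List String), Dom_rank_matched_pattern match_ rank_list → Spec_rank_matched_pattern match_ rank_list (rank_matched_pattern match_ rank_list)

-- ===== LEMMAS AND PROOFS =====

-- the rank key of a triple
def pvKey (x : String × String × Int) : Int := x.2.2

-- Python-side int index of a pattern in rank_list (as A computes it)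
def pvIdx (rank_list : List String) (p : String) : Int :=
  (((PySem.List.index? rank_list p).getD 0 : Nat) : Int)

-- triple A produces for pattern p under tag
def pvMk (rank_list : List String) (tag p : String) : String × String × Int :=
  (p, tag, pvIdx rank_list p)

-- all triples produced inside one tag's list, in A's traversal order
def pvG (rank_list : List String) (tv : String × List String) : List (String × String × Int) :=
  (tv.2.filter (fun p => rank_list.contains p)).map (pvMk rank_list tv.1)

-- B's inner double loop for a fixed pattern pat at rank i
def pvGrp (items : List (String × List String)) (pat : String) (i : Int) : List (String × String × Int) :=
  items.flatMap (fun tv => (tv.2.filter (fun p => p == pat)).map (fun _ => (pat, tv.1, i)))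

-- recursive characterisation of B's outer loop
def pvBspec (items : List (String × List String)) : List String → Int → PySem.Set String → List (String × String × Int)
  | [], _, _ => []
  | pat :: rl, s, seen =>
    if PySem.Set.contains seen pat then pvBspec items rl (s + 1) seen
    else pvGrp items pat s ++ pvBspec items rl (s + 1) (PySem.Set.add seen pat)

-- the first-occurrence rank indices, in increasing order
def pvFk : List String → Int → PySem.Set String → List Int
  | [], _, _ => []
  | pat :: rl, s, seen =>
    if PySem.Set.contains seen pat then pvFk rl (s + 1) seen
    else s :: pvFk rl (s + 1) (PySem.Set.add seen pat)

theorem pv_insertBy_append_skip (bf : (String × String × Int) → (String × String × Int) → Bool)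
    (x : String × String × Int) (as bs : List (String × String × Int))
    (h : ∀ y ∈ as, bf x y = false) :
    PySem.List.insertBy bf x (as ++ bs) = as ++ PySem.List.insertBy bf x bs := by
  induction as with
  | nil => simp
  | cons a as ih =>
    have ha : bf x a = false := h a (by simp)
    simp [PySem.List.insertBy, ha, ih (fun y hy => h y (by simp [hy]))]

theorem pv_insertBy_all_before (bf : (String × String × Int) → (String × String × Int) → Bool)
    (x : String × String × Int) (bs : List (String × String × Int))
    (h : ∀ y ∈ bs, bf x y = true) :
    PySem.List.insertBy bf x bs = x :: bs := by
  cases bs with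
  | nil => simp [PySem.List.insertBy]
  | cons b bs => simp [PySem.List.insertBy, h b (by simp)]

theorem pv_flatMap_congr {α β : Type} (K : List α) (G1 G2 : α → List β)
    (h : ∀ k ∈ K, G1 k = G2 k) : K.flatMap G1 = K.flatMap G2 := by
  induction K with
  | nil => rfl
  | cons k K ih =>
    simp only [List.flatMap_cons, h k (by simp), ih (fun k hk => h k (by simp [hk]))]

theorem pv_insert_groups (K : List Int) (G : Int → List (String × String × Int))
    (x : String × String × Int) (j : Int)
    (hK : K.Pairwise (· < ·)) (hG : ∀ k ∈ K, ∀ y ∈ G k, pvKey y = k)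
    (hx : pvKey x = j) (hj : j ∈ K) :
    PySem.List.insertBy (fun a b => decide (pvKey a < pvKey b)) x (K.flatMap G)
      = K.flatMap (fun k => if k = j then G k ++ [x] else G k) := by
  induction K with
  | nil => cases hj
  | cons k0 K ih =>
    rcases List.pairwise_cons.mp hK with ⟨hk0, hK'⟩
    by_cases hjk : j = k0
    · subst hjk
      have h1 : ∀ y ∈ G j, (fun a b => decide (pvKey a < pvKey b)) x y = false := by
        intro y hy
        have := hG j (by simp) y hy
        simp [hx, this]
      have h2 : ∀ y ∈ K.flatMap G, (fun a b => decide (pvKey a < pvKey b)) x y = true := by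
        intro y hy
        rcases List.mem_flatMap.mp hy with ⟨k, hk, hyk⟩
        have := hG k (by simp [hk]) y hyk
        simp [hx, this]
        exact hk0 k hk
      rw [List.flatMap_cons, pv_insertBy_append_skip _ _ _ _ h1, pv_insertBy_all_before _ _ _ h2]
      have : K.flatMap (fun k => if k = j then G k ++ [x] else G k) = K.flatMap G := by
        apply pv_flatMap_congr
        intro k hk
        have : k ≠ j := by have := hk0 k hk; omega
        simp [this]
      simp [List.flatMap_cons, this]
    · have hjK : j ∈ K := by cases hj with
        | head => exact absurd rfl hjk
        | tail _ h => exact h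
      have h1 : ∀ y ∈ G k0, (fun a b => decide (pvKey a < pvKey b)) x y = false := by
        intro y hy
        have hy' := hG k0 (by simp) y hy
        have : k0 < j := hk0 j hjK
        simp [hx, hy']
        omega
      rw [List.flatMap_cons, pv_insertBy_append_skip _ _ _ _ h1,
        ih hK' (fun k hk => hG k (by simp [hk])) hjK]
      have : ¬ (k0 = j) := fun h => hjk h.symm
      simp [List.flatMap_cons, this]

theorem pv_sort_groups (L : List (String × String × Int)) (K : List Int)
    (hK : K.Pairwise (· < ·)) (hL : ∀ x ∈ L, pvKey x ∈ K) :
    PySem.List.sorted L (fun x => x.2.2) false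
      = K.flatMap (fun k => L.filter (fun x => pvKey x == k)) := by
  have hkey : (fun x : String × String × Int => x.2.2) = pvKey := rfl
  rw [hkey, PySem.List.sorted_eq_foldl_insertBy]
  induction L using List.reverseRecOn with
  | nil => simp
  | append_singleton L x ih =>
    rw [List.foldl_append]
    simp only [List.foldl_cons, List.foldl_nil]
    rw [ih (fun y hy => hL y (by simp [hy]))]
    rw [pv_insert_groups K (fun k => L.filter (fun x => pvKey x == k)) x (pvKey x) hK
      (by intro k _ y hy; have := List.of_mem_filter hy; simpa [pvKey] using this)
      rfl (hL x (by simp))]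
    apply pv_flatMap_congr
    intro k hk
    by_cases h : k = pvKey x
    · subst h
      simp [List.filter_append]
    · have : ¬ (pvKey x == k) = true := by simp; omega
      simp [List.filter_append, h, this]

-- A's collection loop is a flatMap
theorem pv_collectA (items : List (String × List String)) (rank_list : List String) :
    items.foldl (fun acc tv =>
      tv.2.foldl (fun acc pattern =>
        if rank_list.contains pattern then
          acc ++ [(pattern, tv.1, (((PySem.List.index? rank_list pattern).getD 0 : Nat) : Int))]
        else acc) acc) []
    = items.flatMap (pvG rank_list) := by
  have hstep : (fun (acc : List (String × String × Int)) (tv : String × List String) =>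
      tv.2.foldl (fun acc pattern =>
        if rank_list.contains pattern then
          acc ++ [(pattern, tv.1, (((PySem.List.index? rank_list pattern).getD 0 : Nat) : Int))]
        else acc) acc)
      = (fun acc tv => acc ++ pvG rank_list tv) := by
    funext acc tv
    have := PySem.List.foldl_append_if (fun p => rank_list.contains p)
      (pvMk rank_list tv.1) tv.2 acc
    simpa [pvG, pvMk, pvIdx] using this
  rw [hstep, PySem.List.foldl_append_eq_flatMap]
  simp

-- B's inner double loop is pvGrp
theorem pv_collectB (items : List (String × List String)) (pat : String) (i : Int)
    (out : List (String × String × Int)) :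
    items.foldl (fun out tv =>
      tv.2.foldl (fun out p =>
        if p == pat then out ++ [(pat, tv.1, i)] else out) out) out
    = out ++ pvGrp items pat i := by
  have hstep : (fun (out : List (String × String × Int)) (tv : String × List String) =>
      tv.2.foldl (fun out p =>
        if p == pat then out ++ [(pat, tv.1, i)] else out) out)
      = (fun out tv => out ++ (tv.2.filter (fun p => p == pat)).map (fun _ => (pat, tv.1, i))) := by
    funext out tv
    exact PySem.List.foldl_append_if (fun p => p == pat) (fun _ => (pat, tv.1, i)) tv.2 out
  rw [hstep, PySem.List.foldl_append_eq_flatMap]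
  rfl

-- B's outer loop computes pvBspec
theorem pv_B_loop (items : List (String × List String)) (rl : List String) (s : Int)
    (seen : PySem.Set String) (out : List (String × String × Int)) :
    ((PySem.List.enumerate rl s).foldl
      (fun (st : PySem.Set String × List (String × String × Int)) ip =>
        if PySem.Set.contains st.1 ip.2 then st
        else (PySem.Set.add st.1 ip.2,
          items.foldl (fun out tv =>
            tv.2.foldl (fun out p =>
              if p == ip.2 then out ++ [(ip.2, tv.1, ip.1)] else out) out) st.2))
      (seen, out)).2
    = out ++ pvBspec items rl s seen := by
  induction rl generalizing s seen out with
  | nil => simp [pvBspec, PySem.List.enumerate]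
  | cons pat rl ih =>
    rw [PySem.List.enumerate_cons, List.foldl_cons]
    by_cases h : PySem.Set.contains seen pat
    · simp only [h, if_true, pvBspec]
      exact ih (s + 1) seen out
    · simp only [h, if_false, pvBspec, Bool.false_eq_true]
      rw [ih (s + 1) (PySem.Set.add seen pat) _]
      rw [pv_collectB items pat s out]
      simp

theorem pv_fk_lb (rl : List String) (s : Int) (seen : PySem.Set String) :
    ∀ x ∈ pvFk rl s seen, s ≤ x := by
  induction rl generalizing s seen with
  | nil => simp [pvFk]
  | cons pat rl ih =>
    intro x hx
    unfold pvFk at hx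
    by_cases h : PySem.Set.contains seen pat
    · simp only [h, if_true] at hx
      have := ih (s + 1) seen x hx; omega
    · simp only [h, if_false, Bool.false_eq_true, List.mem_cons] at hx
      rcases hx with rfl | hx
      · omega
      · have := ih (s + 1) (PySem.Set.add seen pat) x hx; omega

theorem pv_fk_pairwise (rl : List String) (s : Int) (seen : PySem.Set String) :
    (pvFk rl s seen).Pairwise (· < ·) := by
  induction rl generalizing s seen with
  | nil => simp [pvFk]
  | cons pat rl ih =>
    unfold pvFk
    by_cases h : PySem.Set.contains seen pat
    · simp only [h, if_true]; exact ih (s + 1) seen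
    · simp only [h, if_false, Bool.false_eq_true]
      refine List.pairwise_cons.mpr ⟨?_, ih (s + 1) (PySem.Set.add seen pat)⟩
      intro x hx
      have := pv_fk_lb rl (s + 1) (PySem.Set.add seen pat) x hx
      omega

theorem pv_fk_mem (rl : List String) (s : Int) (seen : PySem.Set String) (p : String) (i : Nat)
    (hseen : ¬ PySem.Set.contains seen p) (hidx : PySem.List.index? rl p = some i) :
    (s + (i : Int)) ∈ pvFk rl s seen := by
  induction rl generalizing s seen i with
  | nil => simp [PySem.List.index?] at hidx
  | cons q rl ih =>
    unfold pvFk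
    by_cases hq : q = p
    · subst hq
      rw [PySem.List.index?_cons_self] at hidx
      have : i = 0 := by simpa using hidx.symm
      subst this
      simp only [PySem.Set.contains, List.contains_eq_mem, decide_eq_true_eq] at hseen
      simp [PySem.Set.contains, List.contains_eq_mem, hseen]
    · rw [PySem.List.index?_cons_of_ne rl hq] at hidx
      rcases Option.map_eq_some_iff.mp hidx with ⟨i', hi', rfl⟩
      by_cases h : PySem.Set.contains seen q
      · simp only [h, if_true]
        have := ih (s + 1) seen i' hseen hi'
        have heq : s + ((i' + 1 : Nat) : Int) = (s + 1) + (i' : Int) := by push_cast; ring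
        rwa [heq]
      · simp only [h, if_false, Bool.false_eq_true, List.mem_cons]
        right
        have hseen' : ¬ PySem.Set.contains (PySem.Set.add seen q) p := by
          simp only [PySem.Set.contains, List.contains_eq_mem, decide_eq_true_eq,
            PySem.Set.mem_add] at hseen ⊢
          rintro (h1 | rfl)
          · exact hseen h1
          · exact hq rfl
        have := ih (s + 1) (PySem.Set.add seen q) i' hseen' hi'
        have heq : s + ((i' + 1 : Nat) : Int) = (s + 1) + (i' : Int) := by push_cast; ring
        rwa [heq]

-- one tag's contribution to A's rank-pre.length group equals B's inner scan for the pattern there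
theorem pv_per_pattern (pre rl' : List String) (pat : String) (hpre : pat ∉ pre)
    (tag : String) (l : List String) :
    ((l.filter (fun p => (pre ++ pat :: rl').contains p)).map
        (pvMk (pre ++ pat :: rl') tag)).filter (fun x => pvKey x == (pre.length : Int))
      = (l.filter (fun p => p == pat)).map (fun _ => (pat, tag, (pre.length : Int))) := by
  have hidxpat : PySem.List.index? (pre ++ pat :: rl') pat = some pre.length := by
    rw [PySem.List.index?_eq_some_iff]
    exact ⟨pre, rl', rfl, rfl, hpre⟩
  induction l with
  | nil => simp
  | cons p l ih =>
    by_cases hp : p = pat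
    · subst hp
      have hc : ((pre ++ p :: rl').contains p) = true := by simp
      have hkey : pvMk (pre ++ p :: rl') tag p = (p, tag, (pre.length : Int)) := by
        unfold pvMk pvIdx
        rw [hidxpat]
        rfl
      rw [List.filter_cons_of_pos hc, List.map_cons, hkey,
        List.filter_cons_of_pos (by simp [pvKey]),
        List.filter_cons_of_pos (by simp), List.map_cons, ih]
    · by_cases hc : ((pre ++ pat :: rl').contains p) = true
      · have hpmem : p ∈ pre ++ pat :: rl' := by simpa using hc
        obtain ⟨k, hk⟩ := Option.isSome_iff_exists.mp
          ((PySem.List.index?_isSome_iff (pre ++ pat :: rl') p).mpr hpmem)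
        have hkne : k ≠ pre.length := by
          intro he
          subst he
          rcases PySem.List.getElem_of_index?_eq_some hk with ⟨hlt, hget, _⟩
          apply hp
          rw [← hget]
          simp [List.getElem_append_right (Nat.le_refl pre.length)]
        have hkey : pvMk (pre ++ pat :: rl') tag p = (p, tag, (k : Int)) := by
          unfold pvMk pvIdx
          rw [hk]
          rfl
        have hb : ((fun x => pvKey x == (pre.length : Int)) (p, tag, (k : Int))) = false := by
          simp only [pvKey, beq_eq_false_iff_ne, ne_eq, Int.natCast_inj]
          exact hkne
        rw [List.filter_cons_of_pos hc, List.map_cons, hkey,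
          List.filter_cons_of_neg (by simp [hb]),
          List.filter_cons_of_neg (by simp [hp]), ih]
      · rw [List.filter_cons_of_neg hc, List.filter_cons_of_neg (by simp [hp]), ih]

-- the group of rank pre.length in A's collection equals B's group for the pattern there
theorem pv_group_eq (items : List (String × List String)) (pre rl' : List String) (pat : String)
    (hpre : pat ∉ pre) :
    (items.flatMap (pvG (pre ++ pat :: rl'))).filter (fun x => pvKey x == (pre.length : Int))
      = pvGrp items pat (pre.length : Int) := by
  rw [List.filter_flatMap]
  apply pv_flatMap_congr
  intro tv _
  exact pv_per_pattern pre rl' pat hpre tv.1 tv.2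

-- flatMap over first-occurrence indices of the per-rank groups is pvBspec
theorem pv_main_rec (items : List (String × List String)) (rank_list : List String) :
    ∀ (rl pre : List String) (seen : PySem.Set String),
    rank_list = pre ++ rl →
    (∀ q, PySem.Set.contains seen q = true ↔ q ∈ pre) →
    (pvFk rl (pre.length : Int) seen).flatMap
        (fun i => (items.flatMap (pvG rank_list)).filter (fun x => pvKey x == i))
      = pvBspec items rl (pre.length : Int) seen := by
  intro rl
  induction rl with
  | nil => intro pre seen _ _; simp [pvFk, pvBspec]
  | cons pat rl ih =>
    intro pre seen hsplit hinv
    unfold pvFk pvBspec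
    by_cases h : PySem.Set.contains seen pat
    · simp only [h, if_true]
      have hsplit' : rank_list = (pre ++ [pat]) ++ rl := by simp [hsplit]
      have hinv' : ∀ q, PySem.Set.contains seen q = true ↔ q ∈ pre ++ [pat] := by
        intro q
        rw [hinv q]
        simp only [List.mem_append, List.mem_singleton]
        constructor
        · exact Or.inl
        · rintro (hq | rfl)
          · exact hq
          · exact (hinv q).mp h
      have := ih (pre ++ [pat]) seen hsplit' hinv'
      have hlen : ((pre ++ [pat]).length : Int) = (pre.length : Int) + 1 := by
        simp
      rwa [hlen] at this
    · simp only [h, if_false, Bool.false_eq_true, List.flatMap_cons]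
      have hpre : pat ∉ pre := fun hm => h ((hinv pat).mpr hm)
      congr 1
      · rw [hsplit]
        exact pv_group_eq items pre rl pat hpre
      · have hsplit' : rank_list = (pre ++ [pat]) ++ rl := by simp [hsplit]
        have hinv' : ∀ q, PySem.Set.contains (PySem.Set.add seen pat) q = true ↔ q ∈ pre ++ [pat] := by
          intro q
          simp only [PySem.Set.contains, List.contains_eq_mem, decide_eq_true_eq, PySem.Set.mem_add,
            List.mem_append, List.mem_singleton]
          constructor
          · rintro (hq | rfl)
            · exact Or.inl ((hinv q).mp (by simpa [PySem.Set.contains, List.contains_eq_mem] using hq))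
            · exact Or.inr rfl
          · rintro (hq | rfl)
            · exact Or.inl (by simpa [PySem.Set.contains, List.contains_eq_mem] using (hinv q).mpr hq)
            · exact Or.inr rfl
        have := ih (pre ++ [pat]) (PySem.Set.add seen pat) hsplit' hinv'
        have hlen : ((pre ++ [pat]).length : Int) = (pre.length : Int) + 1 := by
          simp
        rw [hlen] at this
        exact this

-- every key occurring in A's collection is a first-occurrence index
theorem pv_keys_mem (items : List (String × List String)) (rank_list : List String) :
    ∀ x ∈ items.flatMap (pvG rank_list), pvKey x ∈ pvFk rank_list 0 PySem.Set.empty := by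
  intro x hx
  rcases List.mem_flatMap.mp hx with ⟨tv, _, hxg⟩
  unfold pvG at hxg
  rcases List.mem_map.mp hxg with ⟨p, hpf, rfl⟩
  have hpmem : p ∈ rank_list := by
    have := List.of_mem_filter hpf
    simpa [List.contains_eq_mem] using this
  rcases Option.isSome_iff_exists.mp ((PySem.List.index?_isSome_iff rank_list p).mpr hpmem)
    with ⟨k, hk⟩
  have hidx : pvIdx rank_list p = (k : Int) := by
    unfold pvIdx
    rw [hk]
    rfl
  have : pvKey (pvMk rank_list tv.1 p) = (0 : Int) + (k : Int) := by
    simp [pvMk, pvKey, hidx]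
  rw [this]
  exact pv_fk_mem rank_list 0 PySem.Set.empty p k (by simp [PySem.Set.contains, PySem.Set.empty]) hk

-- ===== VERDICT (by name: the statement is the Claim_ definition above) =====
theorem rank_matched_pattern_spec : Claim_equal_rank_matched_pattern := by
  intro match_ rank_list _
  unfold Spec_rank_matched_pattern rank_matched_pattern rank_matched_pattern_alt
  simp only []
  set items := (PySem.Dict.ofList match_).items with hitems
  rw [pv_collectA items rank_list,
    pv_B_loop items rank_list 0 PySem.Set.empty [],
    pv_sort_groups (items.flatMap (pvG rank_list)) (pvFk rank_list 0 PySem.Set.empty)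
      (pv_fk_pairwise rank_list 0 PySem.Set.empty) (pv_keys_mem items rank_list)]
  have h0 : ((List.length ([] : List String)) : Int) = 0 := by simp
  have := pv_main_rec items rank_list rank_list [] PySem.Set.empty (by simp)
    (by intro q; simp [PySem.Set.contains, PySem.Set.empty])
  rw [h0] at this
  exact this
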